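-- pv_equiv track=rewrite | github.com/Ka-raS/School-Code | Nam 2 Ky 2 - Lap trinh Python/216. SỐ ĐẶC BIỆT.py | sum_exponentials
-- ===== SOURCE A (Python) =====
-- MODULO = 1_000_000_007
--
-- def sum_exponentials(number: int, position: int) -> int:
--     result = 0
--     product = 1
--     binary = bin(position)
--
--     for digit in binary[2:][::-1]:
--         if digit == '1':
--             result = (result + product) % MODULO
--         product = (product * number) % MODULO
--
--     return result
-- ===== SOURCE B (Python) =====
-- MODULO = 1_000_000_007
--
-- def sum_exponentials(number: int, position: int) -> int:
--     # walk the bits of |position| arithmetically; each set bit i contributes number^i mod MODULO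
--     total = 0
--     n = abs(position)
--     i = 0
--     while n:
--         if n & 1:
--             total = (total + pow(number, i, MODULO)) % MODULO
--         n >>= 1
--         i += 1
--     return total
-- ===== Notes on version B (the rewrite author's own statement) =====
-- stated objective: alternative
-- what changed: B replaces A's string walk over bin(position)[2:][::-1] with a running product by an arithmetic loop over the bits of abs(position) (n & 1, n >>= 1), adding an independent modular power pow(number, i, MODULO) for each set bit.
import Mathlib
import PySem

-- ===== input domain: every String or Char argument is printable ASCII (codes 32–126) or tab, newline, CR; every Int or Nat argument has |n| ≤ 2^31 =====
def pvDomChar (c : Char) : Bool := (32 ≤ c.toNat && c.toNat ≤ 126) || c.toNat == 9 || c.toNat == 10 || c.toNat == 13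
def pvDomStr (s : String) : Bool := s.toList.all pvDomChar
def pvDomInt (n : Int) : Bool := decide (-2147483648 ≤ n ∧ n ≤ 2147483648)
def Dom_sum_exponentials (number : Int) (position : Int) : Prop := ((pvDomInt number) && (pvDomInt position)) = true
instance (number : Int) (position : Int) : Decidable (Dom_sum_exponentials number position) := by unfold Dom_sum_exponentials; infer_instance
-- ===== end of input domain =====

-- B replaces A's string walk over bin(position)[2:][::-1] threading a running product by an
-- arithmetic loop over the bits of abs(position), adding an independent modular power per set bit.


-- ===== PORT A =====
-- the loop body: for digit in …: if digit == '1': result = (result+product) % MODULO; product = (product*number) % MODULO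
def pvStepA (number : Int) (st : Int × Int) (digit : Char) : Int × Int :=
  ((if digit = '1' then PySem.Int.mod (st.1 + st.2) 1000000007 else st.1),
   PySem.Int.mod (st.2 * number) 1000000007)

def sum_exponentials (number : Int) (position : Int) : Int :=
  let binary : String := PySem.Int.pyBin position          -- bin(position)
  -- binary[2:][::-1]; [::-1] is reverse (PySem.List.slice?_none_none_neg_one)
  let digits : List Char := (PySem.List.slice binary.toList (some 2) none).reverse
  (digits.foldl (pvStepA number) (0, 1)).1

-- ===== PORT B =====
-- while n: if n & 1: total = (total + pow(number, i, MODULO)) % MODULO; n >>= 1; i += 1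
def pvAltGo (number : Int) (n : Nat) (i : Nat) (total : Int) : Int :=
  if n = 0 then total
  else pvAltGo number (n / 2) (i + 1)
    (if n % 2 = 1 then PySem.Int.mod (total + PySem.Int.powMod number i 1000000007) 1000000007
     else total)
termination_by n
decreasing_by exact Nat.div_lt_self (Nat.pos_of_ne_zero (by assumption)) (by omega)

def sum_exponentials_alt (number : Int) (position : Int) : Int :=
  pvAltGo number position.natAbs 0 0

-- ===== PRECONDITION & SPEC =====
def Spec_sum_exponentials (number : Int) (position : Int) (out : Int) : Prop := out = sum_exponentials_alt number position
instance (number : Int) (position : Int) (out : Int) : Decidable (Spec_sum_exponentials number position out) := by unfold Spec_sum_exponentials; infer_instance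

-- ===== CLAIM (what is proved, stated in full; the proofs are below) =====
def Claim_equal_sum_exponentials : Prop := ∀ (number : Int) (position : Int), Dom_sum_exponentials number position → Spec_sum_exponentials number position (sum_exponentials number position)

-- ===== LEMMAS AND PROOFS =====

-- least-significant-bit-first binary digit characters of a positive Nat
def pvLsb (n : Nat) : List Char :=
  if n = 0 then [] else Nat.digitChar (n % 2) :: pvLsb (n / 2)
termination_by n
decreasing_by exact Nat.div_lt_self (Nat.pos_of_ne_zero (by assumption)) (by omega)

lemma pvLsb_zero : pvLsb 0 = [] := by simp [pvLsb]

lemma pvLsb_pos {n : Nat} (h : n ≠ 0) :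
    pvLsb n = Nat.digitChar (n % 2) :: pvLsb (n / 2) := by
  rw [pvLsb]; simp [h]

-- Nat.toDigits 2 in terms of pvLsb
lemma pvToDigitsCore_eq : ∀ (f n : Nat) (ds : List Char), n < 2 ^ f → 0 < f →
    Nat.toDigitsCore 2 f n ds =
      (if n = 0 then ['0'] else pvLsb n).reverse ++ ds := by
  intro f
  induction f with
  | zero => intro n ds _ hf; omega
  | succ f ih =>
    intro n ds hn _
    rw [Nat.toDigitsCore]
    by_cases h0 : n / 2 = 0
    · rw [if_pos h0]
      have hn1 : n = 0 ∨ n = 1 := by omega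
      rcases hn1 with h | h <;> subst h
      · simp [Nat.digitChar]
      · simp [pvLsb_pos (by omega : (1:Nat) ≠ 0), pvLsb_zero]
    · rw [if_neg h0]
      have hf : 0 < f := by
        by_contra hf0
        have hfe : f = 0 := by omega
        subst hfe
        have : n < 2 := by simpa using hn
        omega
      have hpow : 2 ^ (f + 1) = 2 ^ f * 2 := by ring
      have hlt : n / 2 < 2 ^ f := by
        rw [Nat.div_lt_iff_lt_mul (by omega : 0 < 2)]
        omega
      rw [ih (n / 2) _ hlt hf, if_neg h0]
      rw [if_neg (show ¬ n = 0 by omega), pvLsb_pos (show n ≠ 0 by omega)]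
      simp

lemma pvToDigits_two (n : Nat) :
    Nat.toDigits 2 n = (if n = 0 then ['0'] else pvLsb n).reverse := by
  have hlt : n < 2 ^ (n + 1) := by
    have h1 : n < 2 ^ n := Nat.lt_two_pow_self
    have h2 : 2 ^ n ≤ 2 ^ (n + 1) := Nat.pow_le_pow_right (by omega) (by omega)
    omega
  have h := pvToDigitsCore_eq (n + 1) n [] hlt (by omega)
  simpa [Nat.toDigits] using h

-- the step of A on a non-'1' character leaves the result component unchanged
lemma pvStepA_fst_of_ne (number : Int) (st : Int × Int) {c : Char} (h : c ≠ '1') :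
    (pvStepA number st c).1 = st.1 := by
  simp [pvStepA, h]

-- modular-product bookkeeping: (number^i % M * number) % M = number^(i+1) % M
lemma pvProd_step (number : Int) (i : Nat) :
    PySem.Int.mod (PySem.Int.mod (number ^ i) 1000000007 * number) 1000000007
      = PySem.Int.mod (number ^ (i + 1)) 1000000007 := by
  simp only [PySem.Int.mod_eq_emod_of_pos (by norm_num : (0:Int) < 1000000007)]
  rw [pow_succ]
  conv_lhs => rw [Int.mul_emod]
  rw [Int.emod_emod_of_dvd _ dvd_rfl, ← Int.mul_emod]

-- A's step applied to a binary digit character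
lemma pvStepA_digit (number r p : Int) (b : Nat) (hb : b = 0 ∨ b = 1) :
    pvStepA number (r, p) (Nat.digitChar b)
      = ((if b = 1 then PySem.Int.mod (r + p) 1000000007 else r),
         PySem.Int.mod (p * number) 1000000007) := by
  rcases hb with h | h <;> subst h <;> simp [pvStepA, Nat.digitChar]

-- main loop correspondence: folding A's step over the lsb digits of n starting with
-- product ≡ number^i equals B's bit loop
lemma pvFold_eq (number : Int) : ∀ (n i : Nat) (r : Int),
    (List.foldl (pvStepA number) (r, PySem.Int.mod (number ^ i) 1000000007) (pvLsb n)).1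
      = pvAltGo number n i r := by
  intro n
  induction n using Nat.strong_induction_on with
  | _ n ih =>
    intro i r
    by_cases h0 : n = 0
    · subst h0; simp [pvLsb_zero, pvAltGo]
    · rw [pvLsb_pos h0, pvAltGo, if_neg h0]
      have hbit : n % 2 = 0 ∨ n % 2 = 1 := by omega
      have hdiv : n / 2 < n := Nat.div_lt_self (Nat.pos_of_ne_zero h0) (by omega)
      rcases hbit with hb | hb
      · rw [hb, List.foldl_cons, pvStepA_digit number _ _ 0 (Or.inl rfl)]
        rw [if_neg (by omega : ¬ (0:Nat) = 1), if_neg (by omega : ¬ (0:Nat) = 1)]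
        rw [pvProd_step]
        exact ih (n / 2) hdiv (i + 1) r
      · rw [hb, List.foldl_cons, pvStepA_digit number _ _ 1 (Or.inr rfl)]
        rw [if_pos rfl, if_pos rfl]
        rw [pvProd_step]
        rw [show PySem.Int.powMod number i 1000000007
              = PySem.Int.mod (number ^ i) 1000000007 from rfl]
        exact ih (n / 2) hdiv (i + 1)
          (PySem.Int.mod (r + PySem.Int.mod (number ^ i) 1000000007) 1000000007)

-- A's digit list, after the slice and the reverse, in terms of pvLsb
lemma pvDigits_nonneg (position : Int) (hpos : 0 ≤ position) :
    (PySem.List.slice (PySem.Int.pyBin position).toList (some 2) none).reverse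
      = (if position.toNat = 0 then ['0'] else pvLsb position.toNat) := by
  rw [PySem.Int.toList_pyBin, PySem.Int.toBinChars0b, if_neg (by omega)]
  rw [show ((2 : Int) = ((2 : Nat) : Int)) from rfl, PySem.List.slice_from_natCast]
  simp [pvToDigits_two]

lemma pvDigits_neg (position : Int) (hpos : position < 0) :
    (PySem.List.slice (PySem.Int.pyBin position).toList (some 2) none).reverse
      = (if position.natAbs = 0 then ['0'] else pvLsb position.natAbs) ++ ['b'] := by
  rw [PySem.Int.toList_pyBin, PySem.Int.toBinChars0b, if_pos hpos]
  rw [show ((2 : Int) = ((2 : Nat) : Int)) from rfl, PySem.List.slice_from_natCast]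
  simp [pvToDigits_two]

-- ===== VERDICT (by name: the statement is the Claim_ definition above) =====
theorem sum_exponentials_spec : Claim_equal_sum_exponentials := by
  intro number position _
  unfold Spec_sum_exponentials
  show sum_exponentials number position = sum_exponentials_alt number position
  rw [show sum_exponentials number position
        = (((PySem.List.slice (PySem.Int.pyBin position).toList (some 2) none).reverse).foldl
            (pvStepA number) (0, 1)).1 from rfl,
      show sum_exponentials_alt number position = pvAltGo number position.natAbs 0 0 from rfl]
  have hone : (1 : Int) = PySem.Int.mod (number ^ 0) 1000000007 := by
    rw [pow_zero]; decide
  by_cases hpos : 0 ≤ position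
  · rw [pvDigits_nonneg position hpos]
    by_cases h0 : position.toNat = 0
    · have : position.natAbs = 0 := by omega
      rw [if_pos h0, this]
      simp [pvAltGo, pvStepA]
    · rw [if_neg h0]
      have : position.toNat = position.natAbs := by omega
      rw [this, hone, pvFold_eq]
  · rw [pvDigits_neg position (by omega)]
    rw [if_neg (by omega : position.natAbs ≠ 0)]
    rw [List.foldl_append]
    simp only [List.foldl_cons, List.foldl_nil]
    rw [pvStepA_fst_of_ne number _ (by decide : 'b' ≠ '1')]
    rw [hone, pvFold_eq]
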